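-- pv_equiv track=rewrite | github.com/parrottq/FPD | check.py | match_packages
-- ===== SOURCE A (Python) =====
-- def match_packages(packages, mirrors, cap=100*1000):
--     url_packages = []
--     mirrors = [list(mirror) for mirror in zip(mirrors, [cap]*len(mirrors))]
--
--     # Deal with packages that are bigger than data cap
--     for package in packages:
--         if package[1] > cap:
--             url_packages.append((mirrors.pop(0)[0], package[0]))
--
--     # Assign packages to mirrors while enforcing data caps for each mirror
--     for package in packages:
--         for mirror in mirrors:
--             if mirror[1] - package[1] > 0:
--                 mirror[1] = mirror[1] - package[1]
--                 url_packages.append((mirror[0], package[0]))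
--                 break
--     return url_packages
-- ===== SOURCE B (Python) =====
-- # Alternative algorithm: segment tree of max remaining capacity; descend to the leftmost mirror that fits.
-- def _tmax(t):
--     return t[2] if t[0] == 'leaf' else t[1]
--
-- def _build(ms, cap):
--     if len(ms) == 1:
--         return ('leaf', ms[0], cap)
--     mid = len(ms) // 2
--     l = _build(ms[:mid], cap)
--     r = _build(ms[mid:], cap)
--     return ('node', max(_tmax(l), _tmax(r)), l, r)
--
-- def _assign(t, size):
--     # leftmost leaf with rem - size > 0; returns (name, updated tree) or None
--     if t[0] == 'leaf':
--         _, name, rem = t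
--         if rem - size > 0:
--             return (name, ('leaf', name, rem - size))
--         return None
--     _, m, l, r = t
--     if m - size <= 0:
--         return None
--     res = _assign(l, size)
--     if res is not None:
--         name, l2 = res
--         return (name, ('node', max(_tmax(l2), _tmax(r)), l2, r))
--     res = _assign(r, size)
--     if res is not None:
--         name, r2 = res
--         return (name, ('node', max(_tmax(l), _tmax(r2)), l, r2))
--     return None
--
-- def match_packages(packages, mirrors, cap=100*1000):
--     # oversized packages take the leading mirrors, one each
--     bigs = [name for name, size in packages if size > cap]
--     url_packages = list(zip(mirrors, bigs))
--     rest = mirrors[len(bigs):]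
--     t = _build(rest, cap) if rest else None
--     for name, size in packages:
--         if t is not None:
--             res = _assign(t, size)
--             if res is not None:
--                 mirror_name, t = res
--                 url_packages.append((mirror_name, name))
--     return url_packages
-- ===== Notes on version B (the rewrite author's own statement) =====
-- stated objective: alternative
-- what changed: Replaces A's per-package linear first-fit scan of the mirror list (and its pop(0) loop for oversized packages) with a segment tree of maximum remaining capacity descended to the leftmost fitting mirror, and a zip/slice for the oversized packages; better worst-case complexity, but not measurably faster on the generated (scan-friendly) inputs.
import Mathlib
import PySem

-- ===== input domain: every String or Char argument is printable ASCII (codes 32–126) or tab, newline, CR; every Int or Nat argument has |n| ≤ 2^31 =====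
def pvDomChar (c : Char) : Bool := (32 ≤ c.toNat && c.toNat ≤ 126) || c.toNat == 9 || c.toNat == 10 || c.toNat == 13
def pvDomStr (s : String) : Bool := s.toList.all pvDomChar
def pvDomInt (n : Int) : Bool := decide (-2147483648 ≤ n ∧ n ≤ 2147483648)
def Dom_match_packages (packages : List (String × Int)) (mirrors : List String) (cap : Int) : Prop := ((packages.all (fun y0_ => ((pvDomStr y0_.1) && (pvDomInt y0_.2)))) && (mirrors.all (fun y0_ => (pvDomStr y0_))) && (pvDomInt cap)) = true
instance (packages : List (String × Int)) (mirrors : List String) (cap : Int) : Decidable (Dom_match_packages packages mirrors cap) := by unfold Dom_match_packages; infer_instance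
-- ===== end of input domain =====

-- B replaces A's linear first-fit scan of the mirror list by a segment tree of maximum
-- remaining capacity, descended to the leftmost mirror that fits (objective: alternative
-- algorithm with better worst-case scan behaviour).

-- ===== PORT A =====
-- first loop of A: for each package bigger than cap, pop the first mirror
-- (mirrors.pop(0) on an empty list raises IndexError in Python; excluded by Pre_)
def aBig : List (String × Int) → List (String × Int) → Int → List (String × String) × List (String × Int)
  | [], ms, _ => ([], ms)
  | p :: ps, ms, cap =>
    if p.2 > cap then
      match ms with
      | [] => ([], [])   -- Python raises IndexError here; excluded by Pre_match_packages
      | m :: rest =>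
        let res := aBig ps rest cap
        ((m.1, p.1) :: res.1, res.2)
    else aBig ps ms cap

-- A's inner loop: scan mirrors, on the first with rem - size > 0 update it and break
def aTry : List (String × Int) → Int → Option (String × List (String × Int))
  | [], _ => none
  | m :: ms, s =>
    if m.2 - s > 0 then some (m.1, (m.1, m.2 - s) :: ms)
    else
      match aTry ms s with
      | none => none
      | some (u, ms') => some (u, m :: ms')

-- A's outer loop over packages, threading the mutable mirror list and the url accumulator
def aLoop : List (String × Int) → List (String × Int) → List (String × String) → List (String × String)
  | [], _, acc => acc
  | p :: ps, ms, acc =>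
    match aTry ms p.2 with
    | some (u, ms') => aLoop ps ms' (acc ++ [(u, p.1)])
    | none => aLoop ps ms acc

def match_packages (packages : List (String × Int)) (mirrors : List String) (cap : Int) : List (String × String) :=
  let ms := mirrors.map (fun m => (m, cap))
  let res := aBig packages ms cap
  aLoop packages res.2 res.1

-- ===== PORT B =====
inductive STree : Type where
  | leaf : String → Int → STree
  | node : Int → STree → STree → STree
deriving DecidableEq, Repr

def tmax : STree → Int
  | .leaf _ r => r
  | .node m _ _ => m

-- Source B _build; ms[:mid]/ms[mid:] with 0 ≤ mid ≤ len are exactly List.take/List.drop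
def build : List String → Int → STree
  | [], _ => .leaf "" 0    -- unreachable: Source B only builds on a nonempty list
  | [m], cap => .leaf m cap
  | m1 :: m2 :: rest, cap =>
    let ms := m1 :: m2 :: rest
    let mid := ms.length / 2
    let l := build (ms.take mid) cap
    let r := build (ms.drop mid) cap
    .node (max (tmax l) (tmax r)) l r
termination_by ms _ => ms.length
decreasing_by all_goals simp [List.length_take]; omega

-- Source B _assign: leftmost leaf with rem - size > 0, rebuilding maxima on the path
def assignT : STree → Int → Option (String × STree)
  | .leaf name rem, s =>
    if rem - s > 0 then some (name, .leaf name (rem - s)) else none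
  | .node m l r, s =>
    if m - s ≤ 0 then none
    else
      match assignT l s with
      | some (u, l2) => some (u, .node (max (tmax l2) (tmax r)) l2 r)
      | none =>
        match assignT r s with
        | some (u, r2) => some (u, .node (max (tmax l) (tmax r2)) l r2)
        | none => none

-- Source B main loop over packages (t is None when no mirror remains)
def bLoop : List (String × Int) → Option STree → List (String × String) → List (String × String)
  | [], _, acc => acc
  | _ :: ps, none, acc => bLoop ps none acc
  | p :: ps, some t, acc =>
    match assignT t p.2 with
    | some (u, t') => bLoop ps (some t') (acc ++ [(u, p.1)])
    | none => bLoop ps (some t) acc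

def match_packages_alt (packages : List (String × Int)) (mirrors : List String) (cap : Int) : List (String × String) :=
  let bigs := (packages.filter (fun p => p.2 > cap)).map Prod.fst
  let url1 := List.zip mirrors bigs
  let rest := mirrors.drop bigs.length
  let t0 : Option STree := if rest = [] then none else some (build rest cap)
  bLoop packages t0 url1

-- ===== PRECONDITION & SPEC =====
-- Pre_ excludes exactly the inputs with more over-cap packages than mirrors, on which
-- A's mirrors.pop(0) raises IndexError.
def Pre_match_packages (packages : List (String × Int)) (mirrors : List String) (cap : Int) : Prop :=
  (packages.filter (fun p => p.2 > cap)).length ≤ mirrors.length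
instance (packages : List (String × Int)) (mirrors : List String) (cap : Int) : Decidable (Pre_match_packages packages mirrors cap) := by unfold Pre_match_packages; infer_instance

def pvWitness_match_packages : (List (String × Int)) × List String × Int :=
  ([("p", 5), ("q", 200)], ["m1", "m2"], 100)

def Spec_match_packages (packages : List (String × Int)) (mirrors : List String) (cap : Int) (out : List (String × String)) : Prop := out = match_packages_alt packages mirrors cap
instance (packages : List (String × Int)) (mirrors : List String) (cap : Int) (out : List (String × String)) : Decidable (Spec_match_packages packages mirrors cap out) := by unfold Spec_match_packages; infer_instance

-- ===== CLAIM (what is proved, stated in full; the proofs are below) =====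
def Claim_equal_match_packages : Prop := ∀ (packages : List (String × Int)) (mirrors : List String) (cap : Int), Dom_match_packages packages mirrors cap → Pre_match_packages packages mirrors cap → Spec_match_packages packages mirrors cap (match_packages packages mirrors cap)

-- ===== LEMMAS AND PROOFS =====

-- tree-to-list view of the segment tree
def tList : STree → List (String × Int)
  | .leaf n r => [(n, r)]
  | .node _ l r => tList l ++ tList r

-- invariant: every stored max is the max of the children's stored maxima
def STInv : STree → Prop
  | .leaf _ _ => True
  | .node m l r => m = max (tmax l) (tmax r) ∧ STInv l ∧ STInv r

theorem tmax_bound (t : STree) (h : STInv t) : ∀ p ∈ tList t, p.2 ≤ tmax t := by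
  induction t with
  | leaf n r => intro p hp; simp [tList] at hp; simp [hp, tmax]
  | node m l r ihl ihr =>
    obtain ⟨hm, hl, hr⟩ := h
    intro p hp
    simp only [tList, List.mem_append] at hp
    show p.2 ≤ m
    rcases hp with hp | hp
    · have := ihl hl p hp; omega
    · have := ihr hr p hp; omega

theorem aTry_none (ms : List (String × Int)) (s : Int) (h : ∀ m ∈ ms, ¬ (m.2 - s > 0)) :
    aTry ms s = none := by
  induction ms with
  | nil => rfl
  | cons m ms ih =>
    have hm := h m (by simp)
    simp only [aTry, if_neg hm]
    rw [ih (fun x hx => h x (by simp [hx]))]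

theorem aTry_append (l r : List (String × Int)) (s : Int) :
    aTry (l ++ r) s =
      match aTry l s with
      | some (u, l') => some (u, l' ++ r)
      | none =>
        match aTry r s with
        | some (u, r') => some (u, l ++ r')
        | none => none := by
  induction l with
  | nil =>
    simp only [List.nil_append, aTry]
    cases aTry r s with
    | none => rfl
    | some p => cases p; rfl
  | cons m l ih =>
    simp only [List.cons_append, aTry]
    split_ifs with hm
    · rfl
    · rw [ih]
      cases aTry l s with
      | some p => cases p; rfl
      | none =>
        cases aTry r s with
        | none => rfl
        | some p => cases p; rfl

theorem assignT_eq (t : STree) (s : Int) (h : STInv t) :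
    match assignT t s with
    | none => aTry (tList t) s = none
    | some (u, t') => aTry (tList t) s = some (u, tList t') ∧ STInv t' := by
  induction t with
  | leaf n r =>
    simp only [assignT]
    split_ifs with hc
    · simp only [aTry, tList, STInv]
      refine ⟨?_, trivial⟩
      rw [if_pos hc]
    · simp only [aTry, tList]
      rw [if_neg hc]
  | node m l r ihl ihr =>
    obtain ⟨hm, hl, hr⟩ := h
    by_cases hms : m - s ≤ 0
    · simp only [assignT, if_pos hms]
      apply aTry_none
      intro p hp
      have := tmax_bound (.node m l r) ⟨hm, hl, hr⟩ p hp
      simp [tmax] at this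
      omega
    · have ihl' := ihl hl
      have ihr' := ihr hr
      simp only [assignT, if_neg hms]
      cases hal : assignT l s with
      | some p =>
        obtain ⟨u, l2⟩ := p
        rw [hal] at ihl'
        obtain ⟨hlist, hinv⟩ := ihl'
        simp only [tList, aTry_append, hlist, STInv]
        exact ⟨by simp, by simp, hinv, hr⟩
      | none =>
        rw [hal] at ihl'
        cases har : assignT r s with
        | some p =>
          obtain ⟨u, r2⟩ := p
          rw [har] at ihr'
          obtain ⟨hlist, hinv⟩ := ihr'
          simp only [tList, aTry_append, hlist, ihl', STInv]
          exact ⟨by simp, by simp, hl, hinv⟩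
        | none =>
          rw [har] at ihr'
          simp [tList, aTry_append, ihl', ihr']

theorem build_spec (ms : List String) (cap : Int) (h : ms ≠ []) :
    tList (build ms cap) = ms.map (fun m => (m, cap)) ∧ STInv (build ms cap) := by
  fun_induction build ms cap with
  | case1 _ => exact absurd rfl h
  | case2 m cap => simp [tList, STInv]
  | case3 m1 m2 rest cap ms mid l r ihl ihr =>
    have htne : (m1 :: m2 :: rest).take ((m1 :: m2 :: rest).length / 2) ≠ [] :=
      List.ne_nil_of_length_pos (by simp [List.length_take])
    have hdne : (m1 :: m2 :: rest).drop ((m1 :: m2 :: rest).length / 2) ≠ [] :=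
      List.ne_nil_of_length_pos (by simp [List.length_drop]; omega)
    obtain ⟨hl1, hl2⟩ := ihl htne
    obtain ⟨hr1, hr2⟩ := ihr hdne
    refine ⟨?_, rfl, hl2, hr2⟩
    show tList (build (List.take mid ms) cap) ++ tList (build (List.drop mid ms) cap) = _
    rw [hl1, hr1, ← List.map_append, List.take_append_drop]

-- the loop relation: the tree state views as A's mirror list
theorem loop_eq (ps : List (String × Int)) (ms : List (String × Int)) (t0 : Option STree)
    (acc : List (String × String))
    (h : (t0 = none ∧ ms = []) ∨ ∃ t, t0 = some t ∧ STInv t ∧ tList t = ms) :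
    aLoop ps ms acc = bLoop ps t0 acc := by
  induction ps generalizing ms t0 acc with
  | nil => cases t0 <;> rfl
  | cons p ps ih =>
    rcases h with ⟨ht, hms⟩ | ⟨t, ht, hinv, hlist⟩
    · subst ht hms
      simp only [aLoop, aTry, bLoop]
      exact ih [] none acc (Or.inl ⟨rfl, rfl⟩)
    · subst ht
      have := assignT_eq t p.2 hinv
      simp only [aLoop, bLoop, ← hlist]
      cases hat : assignT t p.2 with
      | some q =>
        obtain ⟨u, t'⟩ := q
        rw [hat] at this
        obtain ⟨h1, h2⟩ := this
        rw [h1]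
        exact ih (tList t') (some t') _ (Or.inr ⟨t', rfl, h2, rfl⟩)
      | none =>
        rw [hat] at this
        rw [this]
        exact ih (tList t) (some t) acc (Or.inr ⟨t, rfl, hinv, rfl⟩)

-- phase 1: A's pop loop equals zip + drop
theorem aBig_eq (ps : List (String × Int)) (ms : List (String × Int)) (cap : Int)
    (h : (ps.filter (fun p => p.2 > cap)).length ≤ ms.length) :
    aBig ps ms cap =
      (List.zip (ms.map Prod.fst) ((ps.filter (fun p => p.2 > cap)).map Prod.fst),
       ms.drop (ps.filter (fun p => p.2 > cap)).length) := by
  induction ps generalizing ms with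
  | nil => simp [aBig]
  | cons p ps ih =>
    by_cases hp : p.2 > cap
    · have hfil : (p :: ps).filter (fun q => q.2 > cap) = p :: ps.filter (fun q => q.2 > cap) := by
        simp [hp]
      rw [hfil] at h ⊢
      cases ms with
      | nil => simp at h
      | cons m rest =>
        simp only [aBig, if_pos hp]
        rw [ih rest (by simpa using h)]
        simp [List.zip]
    · have hfil : (p :: ps).filter (fun q => q.2 > cap) = ps.filter (fun q => q.2 > cap) := by
        simp [hp]
      rw [hfil] at h ⊢
      simp only [aBig, if_neg hp]
      exact ih ms h

-- ===== VERDICT (by name: the statement is the Claim_ definition above) =====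
theorem match_packages_spec : Claim_equal_match_packages := by
  intro packages mirrors cap _ hpre
  show match_packages packages mirrors cap = match_packages_alt packages mirrors cap
  show aLoop packages (aBig packages (mirrors.map (fun m => (m, cap))) cap).2
        (aBig packages (mirrors.map (fun m => (m, cap))) cap).1
      = bLoop packages
          (if mirrors.drop ((packages.filter (fun p => p.2 > cap)).map Prod.fst).length = [] then none
           else some (build (mirrors.drop ((packages.filter (fun p => p.2 > cap)).map Prod.fst).length) cap))
          (mirrors.zip ((packages.filter (fun p => p.2 > cap)).map Prod.fst))
  rw [aBig_eq packages (mirrors.map (fun m => (m, cap))) cap (by simpa using hpre)]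
  have hfst : (mirrors.map (fun m => (m, cap))).map Prod.fst = mirrors := by
    simp [Function.comp_def]
  dsimp only
  rw [hfst, List.length_map, ← List.map_drop]
  set rest := mirrors.drop (packages.filter (fun p => p.2 > cap)).length with hrest
  by_cases hre : rest = []
  · rw [if_pos hre]
    exact loop_eq packages _ none _ (Or.inl ⟨rfl, by simp [hre]⟩)
  · rw [if_neg hre]
    obtain ⟨h1, h2⟩ := build_spec rest cap hre
    exact loop_eq packages _ (some (build rest cap)) _ (Or.inr ⟨build rest cap, rfl, h2, h1⟩)
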